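-- pv_equiv track=rewrite | github.com/J-Wengler/364-Code-Challenges- | bw-matching/main.py | build_last_to_first
-- ===== SOURCE A (Python) =====
-- def get_symbol(lst):
--     return lst[0]
--
-- def build_last_to_first(last_column):
--     # this function should be used to build a
--     # dict last_to_first where the keys are
--     # indexes in the last_column mapped to
--     # values that are the corresponding indexes
--     # in the first_column
--     last_to_first = {}
--     symbol_counts = {}
--     modified_last_column = []
--     i = 0
--     for symbol in last_column:
--         if symbol not in symbol_counts.keys():
--             symbol_counts[symbol] = 1
--         else:
--             symbol_counts[symbol] += 1
--         modified_last_column.append([symbol, symbol_counts[symbol], i])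
--         i += 1
--     modified_first_column = sorted(modified_last_column, key=get_symbol)
--     for i in range(len(modified_first_column)):
--         last_to_first[modified_first_column[i][2]] = i
--     return last_to_first
-- ===== SOURCE B (Python) =====
-- def build_last_to_first(last_column):
--     # bucket (counting) sort: group positions by symbol, then emit ranks in
--     # sorted-symbol order -- O(n + k log k) instead of sorting all n rows.
--     buckets = {}
--     for i, symbol in enumerate(last_column):
--         buckets.setdefault(symbol, []).append(i)
--     last_to_first = {}
--     rank = 0
--     for symbol in sorted(buckets):
--         for i in buckets[symbol]:
--             last_to_first[i] = rank
--             rank += 1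
--     return last_to_first
-- ===== Notes on version B (the rewrite author's own statement) =====
-- stated objective: faster
-- what changed: Replaces decorating every element with (symbol, count, index) and sorting all n rows with a bucket sort: group positions by symbol in one dict pass, sort only the distinct symbols, and assign ranks in a single sweep.
import Mathlib
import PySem

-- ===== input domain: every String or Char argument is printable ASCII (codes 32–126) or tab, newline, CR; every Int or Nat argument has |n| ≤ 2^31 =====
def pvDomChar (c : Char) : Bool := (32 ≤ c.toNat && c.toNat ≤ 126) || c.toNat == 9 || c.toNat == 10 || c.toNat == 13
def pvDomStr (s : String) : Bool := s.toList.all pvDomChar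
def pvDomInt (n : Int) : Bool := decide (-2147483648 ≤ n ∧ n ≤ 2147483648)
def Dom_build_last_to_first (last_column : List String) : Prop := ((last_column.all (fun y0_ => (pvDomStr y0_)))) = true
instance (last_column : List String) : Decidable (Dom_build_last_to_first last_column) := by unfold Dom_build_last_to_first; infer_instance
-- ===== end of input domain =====

-- B replaces decorate-and-sort-all-rows with a bucket sort over the distinct symbols (objective: faster).

-- ===== PORT A =====
-- Python's 3-element list [symbol, count, i] is ported as the triple String × Int × Int.
def get_symbol (lst : String × Int × Int) : String := lst.1

def build_last_to_first (last_column : List String) : List (Int × Int) :=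
  -- state: (symbol_counts, modified_last_column, i)
  let st := last_column.foldl
    (fun (st : PySem.Dict String Int × List (String × Int × Int) × Int) symbol =>
      let symbol_counts :=
        if st.1.contains symbol = false then st.1.insert symbol 1
        else st.1.modify symbol 0 (fun c => c + 1)
      -- symbol_counts[symbol]: the key is present here, ported as getD … 0
      (symbol_counts, st.2.1 ++ [(symbol, symbol_counts.getD symbol 0, st.2.2)], st.2.2 + 1))
    (PySem.Dict.empty, [], 0)
  let modified_first_column := PySem.List.sorted st.2.1 get_symbol
  let last_to_first := (PySem.List.pyRange 0 (PySem.List.len modified_first_column)).foldl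
    (fun (d : PySem.Dict Int Int) i =>
      d.insert (PySem.List.pyGetD modified_first_column i ("", 0, 0)).2.2 i)
    PySem.Dict.empty
  last_to_first.items

-- ===== PORT B =====
def build_last_to_first_alt (last_column : List String) : List (Int × Int) :=
  -- buckets.setdefault(symbol, []).append(i) ≡ modify symbol [] (· ++ [i])
  let buckets := (PySem.List.enumerate last_column).foldl
    (fun (b : PySem.Dict String (List Int)) p => b.modify p.2 [] (fun l => l ++ [p.1]))
    PySem.Dict.empty
  -- state: (last_to_first, rank)
  let st := (PySem.List.sorted buckets.keys (fun s => s)).foldl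
    (fun (st : PySem.Dict Int Int × Int) symbol =>
      (buckets.getD symbol []).foldl
        (fun (st : PySem.Dict Int Int × Int) i => (st.1.insert i st.2, st.2 + 1)) st)
    (PySem.Dict.empty, 0)
  st.1.items

-- ===== PRECONDITION & SPEC =====
def Spec_build_last_to_first (last_column : List String) (out : List (Int × Int)) : Prop := out = build_last_to_first_alt last_column
instance (last_column : List String) (out : List (Int × Int)) : Decidable (Spec_build_last_to_first last_column out) := by unfold Spec_build_last_to_first; infer_instance

-- ===== CLAIM (what is proved, stated in full; the proofs are below) =====
def Claim_equal_build_last_to_first : Prop := ∀ (last_column : List String), Dom_build_last_to_first last_column → Spec_build_last_to_first last_column (build_last_to_first last_column)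

-- ===== LEMMAS AND PROOFS =====

-- insertBy structural equations
theorem insertBy_cons_pos {α : Type} (bf : α → α → Bool) (x y : α) (ys : List α)
    (h : bf x y = true) : PySem.List.insertBy bf x (y :: ys) = x :: y :: ys := by
  simp [PySem.List.insertBy, h]

theorem insertBy_cons_neg {α : Type} (bf : α → α → Bool) (x y : α) (ys : List α)
    (h : bf x y = false) : PySem.List.insertBy bf x (y :: ys) = y :: PySem.List.insertBy bf x ys := by
  simp [PySem.List.insertBy, h]

theorem insertBy_append_not {α : Type} (bf : α → α → Bool) (x : α) (as bs : List α)
    (h : ∀ y ∈ as, bf x y = false) :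
    PySem.List.insertBy bf x (as ++ bs) = as ++ PySem.List.insertBy bf x bs := by
  induction as with
  | nil => rfl
  | cons a as ih =>
    rw [List.cons_append, insertBy_cons_neg bf x a _ (h a (by simp)), ih (fun y hy => h y (by simp [hy]))]
    simp

theorem insertBy_all_true {α : Type} (bf : α → α → Bool) (x : α) (l : List α)
    (h : ∀ y ∈ l, bf x y = true) : PySem.List.insertBy bf x l = x :: l := by
  cases l with
  | nil => rfl
  | cons a as => exact insertBy_cons_pos bf x a as (h a (by simp))

theorem sorted_snoc {α κ : Type} [LT κ] [DecidableLT κ] (xs : List α) (x : α) (key : α → κ) :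
    PySem.List.sorted (xs ++ [x]) key
      = PySem.List.insertBy (fun a b => decide (key a < key b)) x (PySem.List.sorted xs key) := by
  rw [PySem.List.sorted_eq_foldl_insertBy, PySem.List.sorted_eq_foldl_insertBy, List.foldl_append]
  rfl

-- sorted list of keys after one more key
def insKey (k : String) (ks : List String) : List String :=
  if k ∈ ks then ks else PySem.List.insertBy (fun a b => decide (a < b)) k ks

theorem mem_insKey (k : String) (ks : List String) (s : String) :
    s ∈ insKey k ks ↔ s = k ∨ s ∈ ks := by
  unfold insKey
  split_ifs with h
  · constructor
    · exact Or.inr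
    · rintro (rfl | hs) <;> assumption
  · exact PySem.List.mem_insertBy _ k s ks

-- the combinatorial heart: inserting x into a key-grouped list regroups it
theorem insertBy_group (ks : List String) (x : String × Int × Int)
    (xs : List (String × Int × Int)) (hks : ks.Pairwise (· < ·))
    (hcov : ∀ t ∈ xs, t.1 ∈ ks) :
    PySem.List.insertBy (fun a b => decide (a.1 < b.1)) x
        (ks.flatMap (fun s => xs.filter (fun t => t.1 == s)))
      = (insKey x.1 ks).flatMap (fun s => (xs ++ [x]).filter (fun t => t.1 == s)) := by
  induction ks generalizing xs with
  | nil =>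
    have hxs : xs = [] := by
      cases xs with
      | nil => rfl
      | cons t ts => exact absurd (hcov t (by simp)) (by simp)
    subst hxs
    simp [insKey, PySem.List.insertBy]
  | cons s ks ih =>
    have hs := (List.pairwise_cons.mp hks).1
    have hks' := (List.pairwise_cons.mp hks).2
    rcases lt_trichotomy x.1 s with hlt | heq | hgt
    · -- x's key is smaller than every key present: x goes to the front, as a new group
      rw [insertBy_all_true _ _ _ (by
        intro y hy
        obtain ⟨s', hs', hy'⟩ := List.mem_flatMap.mp hy
        have hy1 : y.1 = s' := by simpa using (List.mem_filter.mp hy').2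
        rcases List.mem_cons.mp hs' with rfl | hin
        · simp [hy1, hlt]
        · simp [hy1, lt_trans hlt (hs _ hin)])]
      have hnotin : x.1 ∉ s :: ks := by
        simp only [List.mem_cons, not_or]
        exact ⟨ne_of_lt hlt, fun h => absurd (lt_trans hlt (hs _ h)) (lt_irrefl x.1)⟩
      rw [insKey, if_neg hnotin, insertBy_cons_pos _ _ _ _ (by simp [hlt])]
      simp only [List.flatMap_cons]
      have h1 : (xs ++ [x]).filter (fun t => t.1 == x.1) = [x] := by
        rw [List.filter_append]
        have h0 : xs.filter (fun t => t.1 == x.1) = [] := by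
          refine List.filter_eq_nil_iff.mpr (fun t ht => ?_)
          rcases List.mem_cons.mp (hcov t ht) with h | h
          · simp [h, ne_of_gt hlt]
          · simp [ne_of_gt (lt_trans hlt (hs _ h))]
        simp [h0]
      have h2 : ∀ s' ∈ s :: ks, (xs ++ [x]).filter (fun t => t.1 == s')
          = xs.filter (fun t => t.1 == s') := by
        intro s' hs'
        have hne : x.1 ≠ s' := by
          rcases List.mem_cons.mp hs' with rfl | h
          · exact ne_of_lt hlt
          · exact ne_of_lt (lt_trans hlt (hs _ h))
        rw [List.filter_append]
        simp [hne]
      rw [h1, h2 s (by simp), List.flatMap_congr (fun s' hs' => h2 s' (by simp [hs']))]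
      rfl
    · -- x's key equals the first group's key: x is appended to that group
      rw [List.flatMap_cons,
        insertBy_append_not _ _ _ _ (by
          intro y hy
          have hy1 : y.1 = s := by simpa using (List.mem_filter.mp hy).2
          simp [hy1, heq]),
        insertBy_all_true _ _ _ (by
          intro y hy
          obtain ⟨s', hs', hy'⟩ := List.mem_flatMap.mp hy
          have hy1 : y.1 = s' := by simpa using (List.mem_filter.mp hy').2
          simp only [hy1, heq, decide_eq_true_eq]
          exact hs _ hs')]
      rw [insKey, if_pos (by simp [heq])]
      simp only [List.flatMap_cons]
      have h1 : (xs ++ [x]).filter (fun t => t.1 == s)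
          = xs.filter (fun t => t.1 == s) ++ [x] := by
        rw [List.filter_append]
        simp [heq]
      have h2 : ∀ s' ∈ ks, (xs ++ [x]).filter (fun t => t.1 == s')
          = xs.filter (fun t => t.1 == s') := by
        intro s' hs'
        have hne : x.1 ≠ s' := by
          rw [heq]
          exact ne_of_lt (hs _ hs')
        rw [List.filter_append]
        simp [hne]
      rw [h1, List.flatMap_congr h2, List.append_assoc]
      rfl
    · -- x's key is larger: skip the first group and recurse
      rw [List.flatMap_cons,
        insertBy_append_not _ _ _ _ (by
          intro y hy
          have hy1 : y.1 = s := by simpa using (List.mem_filter.mp hy).2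
          simp [hy1, not_lt.mpr hgt.le])]
      have hgrp : ∀ s', s' ≠ s → (xs.filter (fun t => !(t.1 == s))).filter (fun t => t.1 == s')
          = xs.filter (fun t => t.1 == s') := by
        intro s' hne
        rw [List.filter_filter]
        refine List.filter_congr (fun t ht => ?_)
        by_cases hbe : t.1 = s'
        · subst hbe
          simp [beq_eq_false_iff_ne.mpr hne]
        · simp [hbe]
      have hrw : ks.flatMap (fun s' => xs.filter (fun t => t.1 == s'))
          = ks.flatMap (fun s' => (xs.filter (fun t => !(t.1 == s))).filter (fun t => t.1 == s')) :=
        List.flatMap_congr (fun s' hs' => (hgrp s' (ne_of_gt (hs _ hs'))).symm)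
      rw [hrw, ih (xs.filter (fun t => !(t.1 == s))) hks' (by
        intro t ht
        have ht1 := List.mem_filter.mp ht
        rcases List.mem_cons.mp (hcov t ht1.1) with h | h
        · exact absurd h (by simpa using ht1.2)
        · exact h)]
      have hins : insKey x.1 (s :: ks) = s :: insKey x.1 ks := by
        by_cases hx : x.1 ∈ ks
        · rw [insKey, if_pos (by simp [hx]), insKey, if_pos hx]
        · have hxs : x.1 ∉ s :: ks := by
            simp only [List.mem_cons, not_or]
            exact ⟨ne_of_gt hgt, hx⟩
          rw [insKey, if_neg hxs, insKey, if_neg hx,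
            insertBy_cons_neg _ _ _ _ (by simp [not_lt.mpr hgt.le])]
      rw [hins]
      simp only [List.flatMap_cons]
      have h1 : (xs ++ [x]).filter (fun t => t.1 == s) = xs.filter (fun t => t.1 == s) := by
        rw [List.filter_append]
        simp [ne_of_gt hgt]
      have h2 : ∀ s' ∈ insKey x.1 ks,
          ((xs.filter (fun t => !(t.1 == s))) ++ [x]).filter (fun t => t.1 == s')
            = (xs ++ [x]).filter (fun t => t.1 == s') := by
        intro s' hs'
        have hne : s' ≠ s := by
          rcases (mem_insKey _ _ _).mp hs' with rfl | h
          · exact ne_of_gt hgt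
          · exact ne_of_gt (hs _ h)
        rw [List.filter_append, List.filter_append, hgrp s' hne]
      rw [List.flatMap_congr h2, h1]

-- sorted distinct keys after one more key
theorem sortedKeys_snoc (l : List String) (k : String) :
    PySem.List.sorted (PySem.Set.ofList (l ++ [k])) (fun s => s)
      = insKey k (PySem.List.sorted (PySem.Set.ofList l) (fun s => s)) := by
  have hof : PySem.Set.ofList (l ++ [k]) = PySem.Set.add (PySem.Set.ofList l) k := by
    rw [PySem.Set.ofList, PySem.Set.ofList, List.foldl_append]
    rfl
  by_cases hk : k ∈ PySem.Set.ofList l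
  · have hc : (PySem.Set.ofList l).contains k = true := List.contains_iff_mem.mpr hk
    rw [hof, PySem.Set.add, if_pos hc, insKey,
      if_pos ((PySem.List.mem_sorted _ _ _ _).mpr hk)]
  · have hc : (PySem.Set.ofList l).contains k = false := by
      rw [Bool.eq_false_iff]
      intro h
      exact hk (List.contains_iff_mem.mp h)
    rw [hof, PySem.Set.add, if_neg (by rw [hc]; simp), sorted_snoc, insKey,
      if_neg (fun h => hk ((PySem.List.mem_sorted _ _ _ _).mp h))]

-- stability: sorted-by-first-component is the concatenation of the symbol groups
theorem sorted_fst_eq_flatMap (xs : List (String × Int × Int)) :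
    PySem.List.sorted xs get_symbol
      = (PySem.List.sorted (PySem.Set.ofList (xs.map (fun t => t.1))) (fun s => s)).flatMap
          (fun s => xs.filter (fun t => t.1 == s)) := by
  induction xs using List.reverseRecOn with
  | nil => rfl
  | append_singleton xs x ih =>
    rw [sorted_snoc, ih]
    simp only [get_symbol]
    refine (insertBy_group (PySem.List.sorted (PySem.Set.ofList (xs.map (fun t => t.1))) (fun s => s))
        x xs (PySem.List.sorted_ofList_pairwise_lt _) (fun t ht => by
          rw [PySem.List.mem_sorted, PySem.Set.mem_ofList]
          exact List.mem_map_of_mem ht)).trans ?_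
    rw [List.map_append]
    simp only [List.map_cons, List.map_nil]
    rw [sortedKeys_snoc]

-- ===== A's first loop =====
def bump (sc : PySem.Dict String Int) (s : String) : PySem.Dict String Int :=
  if sc.contains s = false then sc.insert s 1 else sc.modify s 0 (fun c => c + 1)

theorem bump_getD (sc : PySem.Dict String Int) (s : String) :
    (bump sc s).getD s 0 = sc.getD s 0 + 1 := by
  unfold bump
  split_ifs with h
  · rw [PySem.Dict.getD_insert_self, PySem.Dict.getD_of_not_contains sc 0 h]; omega
  · rw [PySem.Dict.getD_modify_self]

def addTriples (sc : PySem.Dict String Int) (i : Int) : List String → List (String × Int × Int)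
  | [] => []
  | s :: xs => (s, sc.getD s 0 + 1, i) :: addTriples (bump sc s) (i + 1) xs

theorem loopA_snd (xs : List String) : ∀ (sc : PySem.Dict String Int)
    (mlc : List (String × Int × Int)) (i : Int),
    (xs.foldl
      (fun (st : PySem.Dict String Int × List (String × Int × Int) × Int) symbol =>
        let symbol_counts :=
          if st.1.contains symbol = false then st.1.insert symbol 1
          else st.1.modify symbol 0 (fun c => c + 1)
        (symbol_counts, st.2.1 ++ [(symbol, symbol_counts.getD symbol 0, st.2.2)], st.2.2 + 1))
      (sc, mlc, i)).2.1 = mlc ++ addTriples sc i xs := by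
  induction xs with
  | nil => intro sc mlc i; simp [addTriples]
  | cons s xs ih =>
    intro sc mlc i
    rw [List.foldl_cons]
    exact (ih (bump sc s) (mlc ++ [(s, (bump sc s).getD s 0, i)]) (i + 1)).trans
      (by rw [bump_getD]; simp [addTriples])

theorem addTriples_map (xs : List String) : ∀ (sc : PySem.Dict String Int) (i : Int),
    (addTriples sc i xs).map (fun t => (t.1, t.2.2))
      = (PySem.List.enumerate xs i).map (fun p => (p.2, p.1)) := by
  induction xs with
  | nil => intro sc i; rfl
  | cons a as ih => intro sc i; simp [addTriples, PySem.List.enumerate_cons, ih]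

-- ===== generic pieces =====
theorem enumerate_map {α β : Type} (xs : List α) (f : α → β) : ∀ (s : Int),
    PySem.List.enumerate (xs.map f) s = (PySem.List.enumerate xs s).map (fun p => (p.1, f p.2)) := by
  induction xs with
  | nil => intro s; rfl
  | cons a as ih => intro s; simp [PySem.List.enumerate_cons, ih]

theorem rank_fold (L : List Int) : ∀ (d : PySem.Dict Int Int) (r : Int),
    L.foldl (fun (st : PySem.Dict Int Int × Int) i => (st.1.insert i st.2, st.2 + 1)) (d, r)
      = ((PySem.List.enumerate L r).foldl (fun d p => d.insert p.2 p.1) d, r + L.length) := by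
  induction L with
  | nil => intro d r; simp [PySem.List.enumerate]
  | cons a as ih =>
    intro d r
    rw [List.foldl_cons, PySem.List.enumerate_cons, List.foldl_cons, ih]
    simp only [Prod.mk.injEq, List.length_cons]
    refine ⟨trivial, ?_⟩
    push_cast
    omega

theorem M_fst (xs : List String) :
    (addTriples PySem.Dict.empty 0 xs).map (fun t => t.1) = xs := by
  have h := congrArg (List.map (fun q : String × Int => q.1)) (addTriples_map xs PySem.Dict.empty 0)
  rw [List.map_map, List.map_map] at h
  exact h.trans (PySem.List.map_snd_enumerate xs 0)

theorem M_idx (xs : List String) :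
    ((addTriples PySem.Dict.empty 0 xs).map (fun t => t.2.2)).Nodup := by
  have h := congrArg (List.map (fun q : String × Int => q.2)) (addTriples_map xs PySem.Dict.empty 0)
  rw [List.map_map, List.map_map] at h
  have h2 : (addTriples PySem.Dict.empty 0 xs).map (fun t => t.2.2)
      = PySem.List.pyRange 0 (0 + (xs.length : Int)) := h.trans (PySem.List.map_fst_enumerate xs 0)
  rw [h2]
  exact PySem.List.nodup_pyRange_one _ _

theorem M_group (xs : List String) (s : String) :
    ((addTriples PySem.Dict.empty 0 xs).filter (fun t => t.1 == s)).map (fun t => t.2.2)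
      = (((PySem.List.enumerate xs).map (fun p => (p.2, p.1))).filter (fun q => q.1 == s)).map
          (fun q => q.2) := by
  have h := List.filter_map (f := fun t : String × Int × Int => (t.1, t.2.2))
    (p := fun q : String × Int => q.1 == s) (l := addTriples PySem.Dict.empty 0 xs)
  rw [addTriples_map xs PySem.Dict.empty 0] at h
  have h2 := congrArg (List.map (fun q : String × Int => q.2)) h.symm
  rw [List.map_map] at h2
  exact h2

-- ===== VERDICT (by name: the statement is the Claim_ definition above) =====
theorem build_last_to_first_spec : Claim_equal_build_last_to_first := by
  intro last_column _
  unfold Spec_build_last_to_first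
  -- A's first loop builds addTriples
  have hM : (List.foldl
      (fun (st : PySem.Dict String Int × List (String × Int × Int) × Int) symbol =>
        let symbol_counts :=
          if st.1.contains symbol = false then st.1.insert symbol 1
          else st.1.modify symbol 0 (fun c => c + 1)
        (symbol_counts, st.2.1 ++ [(symbol, symbol_counts.getD symbol 0, st.2.2)], st.2.2 + 1))
      (PySem.Dict.empty, [], 0) last_column).2.1 = addTriples PySem.Dict.empty 0 last_column :=
    (loopA_snd last_column PySem.Dict.empty [] 0).trans (List.nil_append _)
  have hA : build_last_to_first last_column
      = ((PySem.List.pyRange 0 (PySem.List.len (PySem.List.sorted (List.foldl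
          (fun (st : PySem.Dict String Int × List (String × Int × Int) × Int) symbol =>
            let symbol_counts :=
              if st.1.contains symbol = false then st.1.insert symbol 1
              else st.1.modify symbol 0 (fun c => c + 1)
            (symbol_counts, st.2.1 ++ [(symbol, symbol_counts.getD symbol 0, st.2.2)], st.2.2 + 1))
          (PySem.Dict.empty, [], 0) last_column).2.1 get_symbol))).foldl
        (fun (d : PySem.Dict Int Int) i =>
          d.insert (PySem.List.pyGetD (PySem.List.sorted (List.foldl
            (fun (st : PySem.Dict String Int × List (String × Int × Int) × Int) symbol =>
              let symbol_counts :=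
                if st.1.contains symbol = false then st.1.insert symbol 1
                else st.1.modify symbol 0 (fun c => c + 1)
              (symbol_counts, st.2.1 ++ [(symbol, symbol_counts.getD symbol 0, st.2.2)], st.2.2 + 1))
            (PySem.Dict.empty, [], 0) last_column).2.1 get_symbol) i ("", 0, 0)).2.2 i)
        PySem.Dict.empty).items := rfl
  rw [hA, hM]
  set M := addTriples PySem.Dict.empty 0 last_column with hMdef
  set mfc := PySem.List.sorted M get_symbol with hmfc
  -- A's index loop over range(len(..)) is the loop over enumerate(..)
  have hA2 : ((PySem.List.enumerate mfc).foldl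
        (fun (d : PySem.Dict Int Int) p => d.insert p.2.2.2 p.1) PySem.Dict.empty)
      = (PySem.List.pyRange 0 (PySem.List.len mfc)).foldl
        (fun (d : PySem.Dict Int Int) i =>
          d.insert (PySem.List.pyGetD mfc i ("", 0, 0)).2.2 i) PySem.Dict.empty := by
    rw [PySem.List.enumerate_eq_map_pyRange mfc ("", 0, 0)]
    exact List.foldl_map
  rw [← hA2]
  have hmapk : (PySem.List.enumerate mfc).map (fun p => p.2.2.2) = mfc.map (fun t => t.2.2) := by
    have h := congrArg (List.map (fun t : String × Int × Int => t.2.2))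
      (PySem.List.map_snd_enumerate mfc 0)
    rw [List.map_map] at h
    exact h
  have hnodmfc : (mfc.map (fun t => t.2.2)).Nodup := by
    have hperm : (PySem.List.sorted M get_symbol).Perm M := PySem.List.sorted_perm M get_symbol false
    rw [hmfc]
    exact ((hperm.map (fun t => t.2.2)).nodup_iff).mpr (hMdef ▸ M_idx last_column)
  have hAitems : ((PySem.List.enumerate mfc).foldl
        (fun (d : PySem.Dict Int Int) p => d.insert p.2.2.2 p.1) PySem.Dict.empty).items
      = (PySem.Dict.empty : PySem.Dict Int Int).items
          ++ (PySem.List.enumerate mfc).map (fun p => (p.2.2.2, p.1)) :=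
    PySem.Dict.items_foldl_insert_fresh _ _ _ _
      (fun a _ => PySem.Dict.contains_empty _) (hmapk ▸ hnodmfc)
  rw [hAitems]
  -- B's side
  have hB : build_last_to_first_alt last_column
      = ((PySem.List.sorted ((PySem.List.enumerate last_column).foldl
            (fun (b : PySem.Dict String (List Int)) p => b.modify p.2 [] (fun l => l ++ [p.1]))
            PySem.Dict.empty).keys (fun s => s)).foldl
          (fun (st : PySem.Dict Int Int × Int) symbol =>
            (((PySem.List.enumerate last_column).foldl
              (fun (b : PySem.Dict String (List Int)) p => b.modify p.2 [] (fun l => l ++ [p.1]))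
              PySem.Dict.empty).getD symbol []).foldl
              (fun (st : PySem.Dict Int Int × Int) i => (st.1.insert i st.2, st.2 + 1)) st)
          (PySem.Dict.empty, 0)).1.items := rfl
  rw [hB]
  set buckets := (PySem.List.enumerate last_column).foldl
    (fun (b : PySem.Dict String (List Int)) p => b.modify p.2 [] (fun l => l ++ [p.1]))
    PySem.Dict.empty with hbuck
  have hswap : buckets = ((PySem.List.enumerate last_column).map (fun p => (p.2, p.1))).foldl
      (fun (b : PySem.Dict String (List Int)) q => b.modify q.1 [] (fun l => l ++ [q.2]))
      PySem.Dict.empty := by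
    rw [hbuck]
    exact (List.foldl_map (f := fun p : Int × String => (p.2, p.1))
      (g := fun (b : PySem.Dict String (List Int)) q => b.modify q.1 [] (fun l => l ++ [q.2]))
      (l := PySem.List.enumerate last_column) (init := PySem.Dict.empty)).symm
  have hmapfst : ((PySem.List.enumerate last_column).map (fun p => (p.2, p.1))).map (fun q => q.1)
      = last_column := by
    rw [List.map_map]
    exact PySem.List.map_snd_enumerate last_column 0
  have hkeys : buckets.keys = PySem.Set.ofList last_column := by
    have h2 : (((PySem.List.enumerate last_column).map (fun p => (p.2, p.1))).foldl
        (fun (b : PySem.Dict String (List Int)) q => b.modify q.1 [] (fun l => l ++ [q.2]))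
        PySem.Dict.empty).keys
        = PySem.Set.update PySem.Dict.empty.keys
            (((PySem.List.enumerate last_column).map (fun p => (p.2, p.1))).map (fun q => q.1)) :=
      PySem.Dict.keys_foldl_modify_key
        ((PySem.List.enumerate last_column).map (fun p => (p.2, p.1)))
        (fun q : String × Int => q.1) ([] : List Int)
        (fun _ q => fun l => l ++ [q.2]) PySem.Dict.empty
    rw [hswap, h2, hmapfst, PySem.Dict.keys_empty]
    rfl
  have hget : ∀ s : String, buckets.getD s []
      = (((PySem.List.enumerate last_column).map (fun p => (p.2, p.1))).filter
          (fun q => q.1 == s)).map (fun q => q.2) := by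
    intro s
    have h2 : (((PySem.List.enumerate last_column).map (fun p => (p.2, p.1))).foldl
        (fun (b : PySem.Dict String (List Int)) q => b.modify q.1 [] (fun l => l ++ [q.2]))
        PySem.Dict.empty).getD s []
        = (PySem.Dict.empty : PySem.Dict String (List Int)).getD s []
          ++ (((PySem.List.enumerate last_column).map (fun p => (p.2, p.1))).filter
              (fun q => q.1 == s)).map (fun q => q.2) :=
      PySem.Dict.getD_foldl_modify_append _ _ s
    rw [hswap, h2, PySem.Dict.getD_empty]
    exact List.nil_append _
  have hnest : ((PySem.List.sorted buckets.keys (fun s => s)).foldl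
        (fun (st : PySem.Dict Int Int × Int) symbol =>
          (buckets.getD symbol []).foldl
            (fun (st : PySem.Dict Int Int × Int) i => (st.1.insert i st.2, st.2 + 1)) st)
        (PySem.Dict.empty, 0))
      = ((PySem.List.sorted buckets.keys (fun s => s)).flatMap (fun s => buckets.getD s [])).foldl
          (fun (st : PySem.Dict Int Int × Int) i => (st.1.insert i st.2, st.2 + 1))
          (PySem.Dict.empty, 0) :=
    List.foldl_flatMap.symm
  rw [hnest]
  set L := (PySem.List.sorted buckets.keys (fun s => s)).flatMap (fun s => buckets.getD s []) with hL
  -- the crucial equality: A's sorted third components are exactly B's concatenated buckets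
  have hLeq : mfc.map (fun t => t.2.2) = L := by
    calc mfc.map (fun t => t.2.2)
        = ((PySem.List.sorted (PySem.Set.ofList (M.map (fun t => t.1))) (fun s => s)).flatMap
            (fun s => M.filter (fun t => t.1 == s))).map (fun t => t.2.2) := by
          rw [hmfc, sorted_fst_eq_flatMap]
      _ = (PySem.List.sorted (PySem.Set.ofList last_column) (fun s => s)).flatMap
            (fun s => (M.filter (fun t => t.1 == s)).map (fun t => t.2.2)) := by
          rw [hMdef, M_fst, List.map_flatMap]
      _ = (PySem.List.sorted (PySem.Set.ofList last_column) (fun s => s)).flatMap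
            (fun s => (((PySem.List.enumerate last_column).map (fun p => (p.2, p.1))).filter
              (fun q => q.1 == s)).map (fun q => q.2)) := by
          refine List.flatMap_congr (fun s _ => ?_)
          rw [hMdef]
          exact M_group last_column s
      _ = L := by
          rw [hL, hkeys]
          exact (List.flatMap_congr (fun s _ => hget s)).symm
  have hrank2 : (L.foldl
        (fun (st : PySem.Dict Int Int × Int) i => (st.1.insert i st.2, st.2 + 1))
        (PySem.Dict.empty, 0)).1
      = (PySem.List.enumerate L).foldl (fun (d : PySem.Dict Int Int) p => d.insert p.2 p.1)
          PySem.Dict.empty :=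
    congrArg Prod.fst (rank_fold L PySem.Dict.empty 0)
  rw [hrank2]
  have hnodL : L.Nodup := by
    rw [← hLeq]
    exact hnodmfc
  have hBitems : ((PySem.List.enumerate L).foldl
        (fun (d : PySem.Dict Int Int) p => d.insert p.2 p.1) PySem.Dict.empty).items
      = (PySem.Dict.empty : PySem.Dict Int Int).items
          ++ (PySem.List.enumerate L).map (fun p => (p.2, p.1)) :=
    PySem.Dict.items_foldl_insert_fresh (PySem.List.enumerate L)
      (fun p : Int × Int => p.2) (fun p : Int × Int => p.1) PySem.Dict.empty
      (fun a _ => PySem.Dict.contains_empty _)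
      (by
        have h := PySem.List.map_snd_enumerate L 0
        rw [h]
        exact hnodL)
  rw [hBitems]
  have hfin : (PySem.List.enumerate (mfc.map (fun t => t.2.2))).map (fun p => (p.2, p.1))
      = (PySem.List.enumerate mfc).map (fun p => (p.2.2.2, p.1)) := by
    rw [enumerate_map mfc (fun t => t.2.2) 0, List.map_map]
    rfl
  rw [← hLeq, hfin]
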